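-- pv_equiv track=rewrite | github.com/Tdumenil/projet_l3 | Lifprojet_AM2/comparaison.py | comparaison
-- ===== SOURCE A (Python) =====
-- def comparaison (point,liste) :
--     l = len(liste)
--     i = 0
--     b=0
--     c=0
--     d=0
--     y=0
--     a = []
--     while (i<len(point)):
--         b += (point[i])
--         i += 1
--     i = 0
--     pointr = []
--     while (i<l) :
--         pointr = []
--         pointr = liste[i]
--         j = 0
--         while (j<len(pointr)):
--             d += (pointr[j])
--             j += 1
--         a.append(d)
--         if (c==0) :
--             c = abs(b-a[i])
--             y = i
--         elif (c < abs(b-a[i])):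
--             c = abs(b-a[i])
--             y = i
--         i += 1
--     return y
-- ===== SOURCE B (Python) =====
-- def comparaison(point, liste):
--     b = sum(point)
--     t = 0
--     order = []
--     for i, sub in enumerate(liste):
--         t += sum(sub)
--         order.append((-abs(b - t), i))
--     order.sort()
--     return order[0][1] if order else 0
-- ===== Notes on version B (the rewrite author's own statement) =====
-- stated objective: alternative
-- what changed: Replaces A's fused running-max/flag while loops by a sort-based argmax: build (-abs_diff, index) pairs along the cumulative sum, sort them lexicographically, and return the index component of the first pair.
-- outside the precondition, e.g. on comparaison([], [[], []]): A returns 1, B returns 0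
import Mathlib
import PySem

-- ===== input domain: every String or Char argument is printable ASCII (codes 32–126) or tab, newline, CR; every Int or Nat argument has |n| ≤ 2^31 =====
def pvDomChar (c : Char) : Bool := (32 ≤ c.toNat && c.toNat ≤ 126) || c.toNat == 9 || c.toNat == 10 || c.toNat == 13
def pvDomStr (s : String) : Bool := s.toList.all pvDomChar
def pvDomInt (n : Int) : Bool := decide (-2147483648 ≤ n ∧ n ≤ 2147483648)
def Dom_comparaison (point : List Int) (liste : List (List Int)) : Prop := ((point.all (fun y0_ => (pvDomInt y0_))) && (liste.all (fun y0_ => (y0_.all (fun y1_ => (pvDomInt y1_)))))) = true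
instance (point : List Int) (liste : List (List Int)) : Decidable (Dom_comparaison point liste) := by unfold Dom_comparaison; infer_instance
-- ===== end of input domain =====

-- B replaces A's fused running-max while loops by a sort-based argmax over (-diff, index) pairs (objective: alternative).

-- ===== PORT A =====
-- state of A's main while loop: (i, d, a, c, y)
def comparaison (point : List Int) (liste : List (List Int)) : Int :=
  let b := point.foldl (fun s x => s + x) 0
  let st := liste.foldl (fun (st : Nat × Int × List Int × Int × Int) pointr =>
      let i := st.1
      let d := (pointr.foldl (fun s x => s + x) st.2.1)
      let a := st.2.2.1 ++ [d]
      let c := st.2.2.2.1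
      let y := st.2.2.2.2
      if c = 0 then (i + 1, d, a, |b - a.getD i 0|, (i : Int))
      else if c < |b - a.getD i 0| then (i + 1, d, a, |b - a.getD i 0|, (i : Int))
      else (i + 1, d, a, c, y))
    (0, 0, [], 0, 0)
  st.2.2.2.2

-- ===== PORT B =====
-- state of B's for loop: (i, t, order); then sort lexicographically, then pick
def comparaison_alt (point : List Int) (liste : List (List Int)) : Int :=
  let b := point.sum
  let st := liste.foldl (fun (p : Int × Int × List (Int × Int)) sub =>
      (p.1 + 1, p.2.1 + sub.sum, p.2.2 ++ [(-(|b - (p.2.1 + sub.sum)|), p.1)]))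
    (0, 0, [])
  let order := PySem.List.sorted2 st.2.2 (fun q => q.1) (fun q => q.2) false
  match order with
  | q :: _ => q.2
  | [] => 0

-- ===== PRECONDITION & SPEC =====
-- cumulative sums of the row sums of liste, starting from t
def pvCum (t : Int) (liste : List (List Int)) : List Int :=
  match liste with
  | [] => []
  | sub :: rest =>
      let t' := sub.foldl (fun s x => s + x) t
      t' :: pvCum t' rest

-- Pre_ excludes inputs with ≥ 2 rows on which EVERY cumulative row-sum equals sum(point)
-- (all compared differences are 0): there A's 'c == 0' branch keeps moving y, so A returns the
-- LAST index while B returns the first — a tie corner on which either index is defensible.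
def Pre_comparaison (point : List Int) (liste : List (List Int)) : Prop :=
  liste.length ≤ 1 ∨ ∃ x ∈ pvCum 0 liste, x ≠ point.foldl (fun s x => s + x) 0
instance (point : List Int) (liste : List (List Int)) : Decidable (Pre_comparaison point liste) := by unfold Pre_comparaison; infer_instance

def pvWitness_comparaison : List Int × List (List Int) := ([1], [[0], [2]])

def Spec_comparaison (point : List Int) (liste : List (List Int)) (out : Int) : Prop := out = comparaison_alt point liste
instance (point : List Int) (liste : List (List Int)) (out : Int) : Decidable (Spec_comparaison point liste out) := by unfold Spec_comparaison; infer_instance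

-- ===== CLAIM (what is proved, stated in full; the proofs are below) =====
def Claim_equal_comparaison : Prop := ∀ (point : List Int) (liste : List (List Int)), Dom_comparaison point liste → Pre_comparaison point liste → Spec_comparaison point liste (comparaison point liste)

-- ===== LEMMAS AND PROOFS =====

-- abstract machine extracted from A's (c, y) updates, driven by the diff list
def pvMachine (vs : List Int) (i : Nat) (c y : Int) : Int :=
  match vs with
  | [] => y
  | v :: rest =>
      if c = 0 then pvMachine rest (i + 1) v (i : Int)
      else if c < v then pvMachine rest (i + 1) v (i : Int)
      else pvMachine rest (i + 1) c y

-- max of a nonempty list (0 for [])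
def pvMax : List Int → Int
  | [] => 0
  | v :: rest => rest.foldl max v

-- the (-value, index) pairs B builds, abstracted
def pvPair : List Int → Int → List (Int × Int)
  | [], _ => []
  | v :: rest, i => (-v, i) :: pvPair rest (i + 1)

-- lexicographic ≤ on pairs
def pvLexle (p q : Int × Int) : Prop := p.1 < q.1 ∨ (p.1 = q.1 ∧ p.2 ≤ q.2)

-- the Bool comparison sorted2 uses on (fst, snd)
def pvB4 (a b : Int × Int) : Bool :=
  decide (a.1 < b.1) || (!decide (b.1 < a.1) && decide (a.2 < b.2))

theorem pv_getD_append (a : List Int) (d : Int) : (a ++ [d]).getD a.length 0 = d := by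
  simp [List.getD_eq_getElem?_getD]

theorem pv_foldl_sum (l : List Int) (t : Int) : l.foldl (fun s x => s + x) t = t + l.sum := by
  have h := PySem.List.foldl_add (g := fun x : Int => x) (l := l) (a := t)
  simpa using h

theorem pv_A_fold (b : Int) (liste : List (List Int)) :
    ∀ (i : Nat) (d : Int) (a : List Int) (c y : Int), a.length = i →
    (liste.foldl (fun (st : Nat × Int × List Int × Int × Int) pointr =>
      let i := st.1
      let d := (pointr.foldl (fun s x => s + x) st.2.1)
      let a := st.2.2.1 ++ [d]
      let c := st.2.2.2.1
      let y := st.2.2.2.2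
      if c = 0 then (i + 1, d, a, |b - a.getD i 0|, (i : Int))
      else if c < |b - a.getD i 0| then (i + 1, d, a, |b - a.getD i 0|, (i : Int))
      else (i + 1, d, a, c, y)) (i, d, a, c, y)).2.2.2.2
      = pvMachine ((pvCum d liste).map (fun t => |b - t|)) i c y := by
  induction liste with
  | nil => intro i d a c y h; simp [pvCum, pvMachine]
  | cons sub rest ih =>
      intro i d a c y h
      simp only [List.foldl_cons, pvCum, List.map_cons, pvMachine]
      rw [show (a ++ [sub.foldl (fun s x => s + x) d]).getD i 0
            = sub.foldl (fun s x => s + x) d by rw [← h]; exact pv_getD_append _ _]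
      split_ifs with h1 h2
      · exact ih (i + 1) _ _ _ _ (by simp [h])
      · exact ih (i + 1) _ _ _ _ (by simp [h])
      · exact ih (i + 1) _ _ _ _ (by simp [h])

-- B's fold builds exactly the pvPair list of the |b - cum| values
theorem pv_B_fold (b : Int) (liste : List (List Int)) :
    ∀ (i t : Int) (acc : List (Int × Int)),
    (liste.foldl (fun (p : Int × Int × List (Int × Int)) sub =>
      (p.1 + 1, p.2.1 + sub.sum, p.2.2 ++ [(-(|b - (p.2.1 + sub.sum)|), p.1)])) (i, t, acc)).2.2
      = acc ++ pvPair ((pvCum t liste).map (fun u => |b - u|)) i := by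
  induction liste with
  | nil => intro i t acc; simp [pvCum, pvPair]
  | cons sub rest ih =>
      intro i t acc
      simp only [List.foldl_cons, pvCum, List.map_cons, pvPair]
      rw [ih]
      have hsh : t + sub.sum = sub.foldl (fun s x => s + x) t := (pv_foldl_sum sub t).symm
      simp [hsh]

theorem pv_le_max (vs : List Int) (v : Int) (h : v ∈ vs) : v ≤ pvMax vs := by
  match vs with
  | w :: rest =>
      rcases List.mem_cons.mp h with rfl | hv
      · exact (PySem.List.le_foldl_max rest v).1
      · exact (PySem.List.le_foldl_max rest w).2 v hv

theorem pv_machine_le (vs : List Int) : ∀ (i : Nat) (c y : Int), 0 < c →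
    (∀ v ∈ vs, v ≤ c) → pvMachine vs i c y = y := by
  induction vs with
  | nil => intro i c y _ _; rfl
  | cons v rest ih =>
      intro i c y hc h
      simp only [pvMachine]
      rw [if_neg (by omega), if_neg (by have := h v (by simp); omega)]
      exact ih (i + 1) c y hc (fun u hu => h u (by simp [hu]))

theorem pv_foldl_max_comm (l : List Int) : ∀ (a b : Int),
    l.foldl max (max a b) = max a (l.foldl max b) := by
  induction l with
  | nil => intro a b; simp
  | cons c l ih =>
      intro a b
      simp only [List.foldl_cons]
      rw [max_assoc, ih]

theorem pv_foldl_max_eq (l : List Int) : ∀ (v : Int), (∀ u ∈ l, u ≤ v) → l.foldl max v = v := by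
  induction l with
  | nil => intro v _; rfl
  | cons u l ih =>
      intro v h
      simp only [List.foldl_cons]
      rw [max_eq_left (h u (by simp))]
      exact ih v (fun x hx => h x (by simp [hx]))

theorem pv_max_cons (v : Int) (rest : List Int) (h : rest ≠ []) :
    pvMax (v :: rest) = max v (pvMax rest) := by
  match rest, h with
  | u :: r, _ =>
      show (u :: r).foldl max v = max v (r.foldl max u)
      simp only [List.foldl_cons]
      exact pv_foldl_max_comm r v u

theorem pv_idx_shift (v : Int) (rest : List Int) (m : Int) (hne : v ≠ m)
    (k : Nat) (hk : PySem.List.index? rest m = some k) :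
    PySem.List.index? (v :: rest) m = some (k + 1) := by
  rw [PySem.List.index?_cons_of_ne rest hne, hk]; rfl

theorem pv_machine_pos (vs : List Int) : ∀ (i : Nat) (c y : Int), 0 < c →
    (¬ ∀ v ∈ vs, v ≤ c) →
    ∃ k, PySem.List.index? vs (pvMax vs) = some k ∧
      pvMachine vs i c y = (i : Int) + (k : Int) := by
  induction vs with
  | nil => intro i c y _ h; exact absurd (by intro u hu; simp at hu) h
  | cons v rest ih =>
      intro i c y hc h
      have hc0 : ¬ c = 0 := by omega
      by_cases hcv : c < v
      · simp only [pvMachine]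
        rw [if_neg hc0, if_pos hcv]
        by_cases hall : ∀ u ∈ rest, u ≤ v
        · refine ⟨0, ?_, ?_⟩
          · rw [show pvMax (v :: rest) = v from pv_foldl_max_eq rest v hall]
            exact PySem.List.index?_cons_self v rest
          · rw [pv_machine_le rest (i + 1) v (i : Int) (by omega) hall]; simp
        · obtain ⟨k, hk, hm⟩ := ih (i + 1) v (i : Int) (by omega) hall
          have hrne : rest ≠ [] := by rintro rfl; exact hall (by intro u hu; simp at hu)
          push_neg at hall
          obtain ⟨u, hu, hvu⟩ := hall
          have hvm : v < pvMax rest := lt_of_lt_of_le hvu (pv_le_max rest u hu)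
          have hmx : pvMax (v :: rest) = pvMax rest := by
            rw [pv_max_cons v rest hrne, max_eq_right (le_of_lt hvm)]
          refine ⟨k + 1, ?_, ?_⟩
          · rw [hmx]; exact pv_idx_shift v rest _ (by omega) k hk
          · rw [hm]; push_cast; omega
      · simp only [pvMachine]
        rw [if_neg hc0, if_neg hcv]
        have hall : ¬ ∀ u ∈ rest, u ≤ c := by
          intro hall; exact h (fun u hu => by
            rcases List.mem_cons.mp hu with rfl | hu'
            · omega
            · exact hall u hu')
        obtain ⟨k, hk, hm⟩ := ih (i + 1) c y hc hall
        have hrne : rest ≠ [] := by rintro rfl; exact hall (by intro u hu; simp at hu)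
        push_neg at hall
        obtain ⟨u, hu, hcu⟩ := hall
        have hvm : v < pvMax rest := by
          have := pv_le_max rest u hu; omega
        have hmx : pvMax (v :: rest) = pvMax rest := by
          rw [pv_max_cons v rest hrne, max_eq_right (le_of_lt hvm)]
        refine ⟨k + 1, ?_, ?_⟩
        · rw [hmx]; exact pv_idx_shift v rest _ (by omega) k hk
        · rw [hm]; push_cast; omega

theorem pv_machine_zero (vs : List Int) : ∀ (i : Nat) (y : Int),
    (∀ v ∈ vs, 0 ≤ v) → (∃ v ∈ vs, v ≠ 0) →
    ∃ k, PySem.List.index? vs (pvMax vs) = some k ∧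
      pvMachine vs i 0 y = (i : Int) + (k : Int) := by
  induction vs with
  | nil => intro i y _ h; simp at h
  | cons v rest ih =>
      intro i y hnn hex
      simp only [pvMachine, if_true]
      by_cases hv : v = 0
      · subst hv
        have hex' : ∃ u ∈ rest, u ≠ 0 := by
          obtain ⟨u, hu, hune⟩ := hex
          rcases List.mem_cons.mp hu with rfl | hu'
          · exact absurd rfl hune
          · exact ⟨u, hu', hune⟩
        obtain ⟨k, hk, hm⟩ := ih (i + 1) (i : Int) (fun u hu => hnn u (by simp [hu])) hex'
        obtain ⟨u, hu, hune⟩ := hex'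
        have hum : 0 < pvMax rest := by
          have h1 := hnn u (by simp [hu])
          have h2 := pv_le_max rest u hu
          omega
        have hrne : rest ≠ [] := by rintro rfl; simp at hu
        have hmx : pvMax (0 :: rest) = pvMax rest := by
          rw [pv_max_cons 0 rest hrne, max_eq_right (le_of_lt hum)]
        refine ⟨k + 1, ?_, ?_⟩
        · rw [hmx]; exact pv_idx_shift 0 rest _ (by omega) k hk
        · rw [hm]; push_cast; omega
      · have hvpos : 0 < v := by have := hnn v (by simp); omega
        by_cases hall : ∀ u ∈ rest, u ≤ v
        · refine ⟨0, ?_, ?_⟩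
          · rw [show pvMax (v :: rest) = v from pv_foldl_max_eq rest v hall]
            exact PySem.List.index?_cons_self v rest
          · rw [pv_machine_le rest (i + 1) v (i : Int) hvpos hall]; simp
        · obtain ⟨k, hk, hm⟩ := pv_machine_pos rest (i + 1) v (i : Int) hvpos hall
          have hrne : rest ≠ [] := by rintro rfl; exact hall (by intro u hu; simp at hu)
          push_neg at hall
          obtain ⟨u, hu, hvu⟩ := hall
          have hvm : v < pvMax rest := lt_of_lt_of_le hvu (pv_le_max rest u hu)
          have hmx : pvMax (v :: rest) = pvMax rest := by
            rw [pv_max_cons v rest hrne, max_eq_right (le_of_lt hvm)]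
          refine ⟨k + 1, ?_, ?_⟩
          · rw [hmx]; exact pv_idx_shift v rest _ (by omega) k hk
          · rw [hm]; push_cast; omega

-- basic facts about the lexicographic order and pvB4
theorem pv_lexle_refl (p : Int × Int) : pvLexle p p := Or.inr ⟨rfl, le_refl _⟩

theorem pv_lexle_trans {p q r : Int × Int} (h1 : pvLexle p q) (h2 : pvLexle q r) : pvLexle p r := by
  unfold pvLexle at *
  rcases h1 with h1 | ⟨h1a, h1b⟩ <;> rcases h2 with h2 | ⟨h2a, h2b⟩
  · exact Or.inl (lt_trans h1 h2)
  · exact Or.inl (by omega)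
  · exact Or.inl (by omega)
  · exact Or.inr ⟨by omega, by omega⟩

theorem pv_b4_true {a b : Int × Int} (h : pvB4 a b = true) : pvLexle a b := by
  unfold pvB4 at h
  unfold pvLexle
  simp only [Bool.or_eq_true, Bool.and_eq_true, Bool.not_eq_true', decide_eq_true_eq,
    decide_eq_false_iff_not] at h
  rcases h with h | ⟨h1, h2⟩
  · exact Or.inl h
  · by_cases hlt : a.1 < b.1
    · exact Or.inl hlt
    · exact Or.inr ⟨by omega, le_of_lt h2⟩

theorem pv_b4_false {a b : Int × Int} (h : pvB4 a b = false) : pvLexle b a := by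
  unfold pvB4 at h
  unfold pvLexle
  simp only [Bool.or_eq_false_iff, Bool.and_eq_false_iff, Bool.not_eq_false',
    decide_eq_true_eq, decide_eq_false_iff_not] at h
  rcases h with ⟨h1, h2 | h2⟩
  · exact Or.inl h2
  · by_cases hlt : b.1 < a.1
    · exact Or.inl hlt
    · exact Or.inr ⟨by omega, by omega⟩

theorem pv_insert_head? (x : Int × Int) (ys : List (Int × Int)) :
    (PySem.List.insertBy pvB4 x ys).head? =
      some (match ys with | [] => x | y :: _ => if pvB4 x y then x else y) := by
  cases ys with
  | nil => rfl
  | cons y t =>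
      show (if pvB4 x y then x :: y :: t else y :: PySem.List.insertBy pvB4 x t).head? = _
      by_cases h : pvB4 x y <;> simp [h]

-- the head of an insertBy-fold is a lex lower bound of everything inserted
theorem pv_fold_min (xs : List (Int × Int)) : ∀ (acc : List (Int × Int)) (m : Int × Int),
    acc.head? = some m →
    ∃ m', (xs.foldl (fun a x => PySem.List.insertBy pvB4 x a) acc).head? = some m' ∧
      (m' = m ∨ m' ∈ xs) ∧ pvLexle m' m ∧ ∀ y ∈ xs, pvLexle m' y := by
  induction xs with
  | nil =>
      intro acc m h
      exact ⟨m, h, Or.inl rfl, pv_lexle_refl m, by intro y hy; simp at hy⟩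
  | cons x xs ih =>
      intro acc m h
      cases acc with
      | nil => simp at h
      | cons a t =>
          have hm : a = m := by simpa using h
          subst hm
          simp only [List.foldl_cons]
          set m1 : Int × Int := if pvB4 x a then x else a with hm1
          have hh : (PySem.List.insertBy pvB4 x (a :: t)).head? = some m1 := pv_insert_head? x (a :: t)
          obtain ⟨m', h1, h2, h3, h4⟩ := ih _ m1 hh
          have hle_m1_a : pvLexle m1 a := by
            by_cases hb : pvB4 x a
            · rw [hm1, if_pos hb]; exact pv_b4_true hb
            · rw [hm1, if_neg hb]; exact pv_lexle_refl a
          have hle_m1_x : pvLexle m1 x := by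
            by_cases hb : pvB4 x a
            · rw [hm1, if_pos hb]; exact pv_lexle_refl x
            · rw [hm1, if_neg hb]; exact pv_b4_false (by simpa using hb)
          refine ⟨m', h1, ?_, pv_lexle_trans h3 hle_m1_a, ?_⟩
          · rcases h2 with rfl | h2
            · by_cases hb : pvB4 x a
              · rw [hm1, if_pos hb]; exact Or.inr (by simp)
              · rw [hm1, if_neg hb]; exact Or.inl rfl
            · exact Or.inr (by simp [h2])
          · intro y hy
            rcases List.mem_cons.mp hy with rfl | hy'
            · exact pv_lexle_trans h3 hle_m1_x
            · exact h4 y hy'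

theorem pv_mem_pvPair (vs : List Int) : ∀ (i : Int) (p : Int × Int),
    p ∈ pvPair vs i ↔ ∃ j : Nat, ∃ h : j < vs.length, p = (-vs[j], i + j) := by
  induction vs with
  | nil => intro i p; simp [pvPair]
  | cons v rest ih =>
      intro i p
      simp only [pvPair, List.mem_cons, ih]
      constructor
      · rintro (rfl | ⟨j, hj, rfl⟩)
        · exact ⟨0, by simp, by simp⟩
        · exact ⟨j + 1, by simpa using hj, by simp; push_cast; ring_nf⟩
      · rintro ⟨j, hj, rfl⟩
        cases j with
        | zero => exact Or.inl (by simp)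
        | succ j =>
            refine Or.inr ⟨j, by simpa using hj, ?_⟩
            simp; push_cast; ring_nf

-- the unique lex-min pair is (-max, first index of max)
theorem pv_min_pair (vs : List Int) (k : Nat)
    (hk : PySem.List.index? vs (pvMax vs) = some k)
    (m' : Int × Int) (hmem : m' ∈ pvPair vs 0) (hlb : ∀ y ∈ pvPair vs 0, pvLexle m' y) :
    m' = (-pvMax vs, (k : Int)) := by
  obtain ⟨hklen, hkval, hkfirst⟩ := PySem.List.getElem_of_index?_eq_some hk
  obtain ⟨j, hj, rfl⟩ := (pv_mem_pvPair vs 0 m').mp hmem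
  have hkmem : ((-pvMax vs : Int), ((k : Int))) ∈ pvPair vs 0 := by
    rw [pv_mem_pvPair]
    exact ⟨k, hklen, by rw [hkval]; simp⟩
  have hle := hlb _ hkmem
  have hjle : vs[j] ≤ pvMax vs := pv_le_max vs _ (List.getElem_mem hj)
  have hjeq : vs[j] = pvMax vs := by
    rcases hle with h | ⟨h, _⟩ <;> [skip; omega] <;> simp at h <;> omega
  have hjk : j = k := by
    by_contra hne
    have hjltk : j < k := by
      rcases hle with h | ⟨_, h2⟩
      · omega
      · simp at h2; omega
    exact hkfirst j hjltk hjeq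
  subst hjk
  rw [hjeq]
  simp

-- B's value, through pvPair and sorted2
theorem pv_B_eq (point : List Int) (liste : List (List Int)) :
    comparaison_alt point liste =
      (match PySem.List.sorted2 (pvPair ((pvCum 0 liste).map (fun u => |point.sum - u|)) 0)
          (fun q => q.1) (fun q => q.2) false with
       | q :: _ => q.2 | [] => (0 : Int)) := by
  show (match PySem.List.sorted2 ((liste.foldl (fun (p : Int × Int × List (Int × Int)) sub =>
      (p.1 + 1, p.2.1 + sub.sum, p.2.2 ++ [(-(|point.sum - (p.2.1 + sub.sum)|), p.1)])) (0, 0, [])).2.2)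
      (fun q => q.1) (fun q => q.2) false with
     | q :: _ => q.2 | [] => (0 : Int)) = _
  rw [pv_B_fold point.sum liste 0 0 [], List.nil_append]

-- ===== VERDICT (by name: the statement is the Claim_ definition above) =====
theorem comparaison_spec : Claim_equal_comparaison := by
  intro point liste _hdom hpre
  unfold Spec_comparaison
  rw [pv_B_eq]
  unfold comparaison
  rw [pv_A_fold _ _ 0 0 [] 0 0 rfl]
  rw [show point.foldl (fun s x => s + x) 0 = point.sum from by simpa using pv_foldl_sum point 0]
  set b := point.sum with hb
  set vs : List Int := (pvCum 0 liste).map (fun u => |b - u|) with hvs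
  by_cases hex : ∃ v ∈ vs, v ≠ 0
  · obtain ⟨k, hk, hm⟩ := pv_machine_zero vs 0 0
      (by intro v hv; rw [hvs] at hv; obtain ⟨t, _, rfl⟩ := List.mem_map.mp hv; exact abs_nonneg _)
      hex
    rw [hm]
    cases hvv : vs with
    | nil => rw [hvv] at hk; simp [PySem.List.index?] at hk
    | cons v0 vrest =>
        rw [← hvv]
        have hpair : pvPair vs 0 = (-v0, 0) :: pvPair vrest 1 := by rw [hvv]; rfl
        rw [hpair]
        have hs : PySem.List.sorted2 ((-v0, (0:Int)) :: pvPair vrest 1) (fun q => q.1) (fun q => q.2) false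
            = (pvPair vrest 1).foldl (fun a x => PySem.List.insertBy pvB4 x a)
                (PySem.List.insertBy pvB4 (-v0, (0:Int)) []) := rfl
        rw [hs]
        obtain ⟨m', h1, h2, h3, h4⟩ := pv_fold_min (pvPair vrest 1)
          (PySem.List.insertBy pvB4 (-v0, (0:Int)) []) (-v0, (0:Int)) rfl
        have hmem : m' ∈ pvPair vs 0 := by
          rw [hpair]
          rcases h2 with rfl | h2
          · simp
          · simp [h2]
        have hlb : ∀ y ∈ pvPair vs 0, pvLexle m' y := by
          intro y hy
          rw [hpair] at hy
          rcases List.mem_cons.mp hy with rfl | hy'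
          · exact h3
          · exact h4 y hy'
        have hmk := pv_min_pair vs k hk m' hmem hlb
        cases hres : (pvPair vrest 1).foldl (fun a x => PySem.List.insertBy pvB4 x a)
            (PySem.List.insertBy pvB4 (-v0, (0:Int)) []) with
        | nil => rw [hres] at h1; simp at h1
        | cons q l' =>
            rw [hres] at h1
            have hq : q = m' := by simpa using h1
            rw [hq, hmk]
            simp
  · -- all diffs are 0; Pre_ forces liste.length <= 1
    have hlen : liste.length ≤ 1 := by
      rcases hpre with h | ⟨x, hx, hxb⟩
      · exact h
      · exfalso
        apply hex
        refine ⟨|b - x|, by rw [hvs]; exact List.mem_map.mpr ⟨x, hx, rfl⟩, ?_⟩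
        intro h0
        rw [show point.foldl (fun s x => s + x) 0 = b from by simpa using pv_foldl_sum point 0] at hxb
        exact hxb (by have := abs_eq_zero.mp h0; omega)
    rcases liste with _ | ⟨sub, rest⟩
    · rfl
    · rcases rest with _ | ⟨sub2, rest2⟩
      · rfl
      · simp at hlen
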